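-- pv_equiv track=rewrite | github.com/JoshAlvarado/Python | Challenges/General Problems/Strings/Multi_word_Search_Dict.py | multi_word_search
-- ===== SOURCE A (Python) =====
-- def multi_word_search(doc_list, keywords):
--     """
--     Takes list of documents (each document is a string) and a list of keywords.
--     Returns a dictionary where each key is a keyword, and the value is a list of indices
--     (from doc_list) of the documents containing that keyword
--
--     >>> doc_list = ["The Learn Python Challenge Casino.", "They bought a car and a casino", "Casinoville"]
--     >>> keywords = ['casino', 'they']
--     >>> multi_word_search(doc_list, keywords)
--     {'casino': [0, 1], 'they': [1]}
--     """
--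
--     wordsearchdic = {}
--     replace = ['.',',','!']
--     for word in keywords:
--         i = 0 # set i back to 0 for the first thing in list
--         doc_number = [] # clear list
--         for sentence in doc_list: #each invidual item in a list
--             sentence = sentence.lower() #lower the everything so that capilization isnt a factor
--             for value in replace: #clean data of punctuation
--                 sentence = sentence.replace(value, '') #remove punctuation
--             if word in sentence.split(): # if keyword in item add index to list.
--                 doc_number.append(i) # add index to list
--             i += 1 # increase index
--         wordsearchdic[word] = doc_number # set finished list to dictionary
--     return wordsearchdic        # return dict
-- ===== SOURCE B (Python) =====
-- def multi_word_search(doc_list, keywords):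
--     # Build an inverted index word -> sorted list of document indices in one
--     # document-major pass, then answer every keyword by a single lookup.
--     index = {}
--     for i, doc in enumerate(doc_list):
--         cleaned = doc.lower().replace('.', '').replace(',', '').replace('!', '')
--         for w in set(cleaned.split()):
--             index.setdefault(w, []).append(i)
--     return {kw: index.get(kw, []) for kw in keywords}
-- ===== Notes on version B (the rewrite author's own statement) =====
-- stated objective: faster
-- what changed: Replaces A's keyword-major rescan of all documents per keyword with a single document-major pass building an inverted index (word -> doc indices), answered per keyword by one dictionary lookup.
import Mathlib
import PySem

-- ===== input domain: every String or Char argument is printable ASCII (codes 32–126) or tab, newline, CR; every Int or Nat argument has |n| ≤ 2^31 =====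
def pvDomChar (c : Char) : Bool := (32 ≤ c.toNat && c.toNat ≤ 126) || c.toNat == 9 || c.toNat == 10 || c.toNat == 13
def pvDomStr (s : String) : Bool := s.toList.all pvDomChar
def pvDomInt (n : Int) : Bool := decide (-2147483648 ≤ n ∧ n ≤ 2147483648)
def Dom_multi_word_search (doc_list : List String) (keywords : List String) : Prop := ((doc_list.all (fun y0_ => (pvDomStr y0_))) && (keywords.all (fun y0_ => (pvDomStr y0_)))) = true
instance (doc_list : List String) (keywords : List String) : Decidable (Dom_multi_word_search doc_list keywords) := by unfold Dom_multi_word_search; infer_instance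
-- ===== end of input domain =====

-- B replaces A's keyword-major rescan of all documents per keyword by one document-major
-- pass building an inverted index, answered per keyword by a single lookup (objective: faster).

-- ===== PORT A =====
-- literal transliteration of A: for each keyword, scan doc_list with a counter i,
-- cleaning each sentence (lower, then remove '.' ',' '!' by a loop over the replace list)
-- and appending i when the keyword occurs among the words.
def multi_word_search (doc_list : List String) (keywords : List String) : List (String × List Int) :=
  let replaceL := [".", ",", "!"]
  (keywords.foldl
    (fun (dic : PySem.Dict String (List Int)) word =>
      let st := doc_list.foldl
        (fun (st : Int × List Int) sentence =>
          let sentence := PySem.Str.lower sentence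
          let sentence := replaceL.foldl (fun s v => PySem.Str.replace s v "") sentence
          let doc_number :=
            if (PySem.Str.split₀ sentence).contains word then st.2 ++ [st.1] else st.2
          (st.1 + 1, doc_number))
        (0, [])
      dic.insert word st.2)
    PySem.Dict.empty).items

-- ===== PORT B =====
def pvCleanWords (doc : String) : PySem.Set String :=
  PySem.Set.ofList (PySem.Str.split₀
    (PySem.Str.replace (PySem.Str.replace (PySem.Str.replace (PySem.Str.lower doc) "." "") "," "") "!" ""))

-- 'index.setdefault(w, []).append(i)' sets index[w] = index.get(w, []) + [i]:
-- exactly PySem.Dict.modify w [] (· ++ [i]).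
def pvBuildIndex (doc_list : List String) : PySem.Dict String (List Int) :=
  (PySem.List.enumerate doc_list).foldl
    (fun index p =>
      (pvCleanWords p.2).foldl (fun index w => index.modify w [] (· ++ [p.1])) index)
    PySem.Dict.empty

def multi_word_search_alt (doc_list : List String) (keywords : List String) : List (String × List Int) :=
  let index := pvBuildIndex doc_list
  (keywords.foldl
    (fun (res : PySem.Dict String (List Int)) kw => res.insert kw (index.getD kw []))
    PySem.Dict.empty).items

-- ===== PRECONDITION & SPEC =====
def Spec_multi_word_search (doc_list : List String) (keywords : List String) (out : List (String × List Int)) : Prop := out = multi_word_search_alt doc_list keywords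
instance (doc_list : List String) (keywords : List String) (out : List (String × List Int)) : Decidable (Spec_multi_word_search doc_list keywords out) := by unfold Spec_multi_word_search; infer_instance

-- ===== CLAIM (what is proved, stated in full; the proofs are below) =====
def Claim_equal_multi_word_search : Prop := ∀ (doc_list : List String) (keywords : List String), Dom_multi_word_search doc_list keywords → Spec_multi_word_search doc_list keywords (multi_word_search doc_list keywords)

-- ===== LEMMAS AND PROOFS =====

-- one per-document step of the index build appends i to exactly the lists of the (distinct) words ws
theorem pv_inner_getD (ws : List String) (hnd : ws.Nodup) (i : Int)
    (d : PySem.Dict String (List Int)) (w : String) :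
    (ws.foldl (fun d w' => d.modify w' [] (· ++ [i])) d).getD w []
      = d.getD w [] ++ (if w ∈ ws then [i] else []) := by
  induction ws generalizing d with
  | nil => simp
  | cons a t ih =>
    rcases List.nodup_cons.mp hnd with ⟨ha, ht⟩
    simp only [List.foldl_cons, ih ht]
    rw [PySem.Dict.getD_modify]
    by_cases hw : w = a
    · subst hw
      simp [ha]
    · simp [hw]

theorem pv_contains_ofList (l : List String) (x : String) :
    (PySem.Set.ofList l).contains x = l.contains x := by
  by_cases h : x ∈ l <;> simp [PySem.Set.mem_ofList, h]

theorem pv_index_getD (docs : List String) (s : Int)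
    (d : PySem.Dict String (List Int)) (w : String) :
    ((PySem.List.enumerate docs s).foldl
        (fun index p => (pvCleanWords p.2).foldl (fun index w' => index.modify w' [] (· ++ [p.1])) index)
        d).getD w []
      = d.getD w [] ++
        (((PySem.List.enumerate docs s).filter (fun p => (pvCleanWords p.2).contains w)).map (·.1)) := by
  induction docs generalizing s d with
  | nil => simp [PySem.List.enumerate_nil]
  | cons doc t ih =>
    rw [PySem.List.enumerate_cons]
    simp only [List.foldl_cons, List.filter_cons]
    have hnd : (pvCleanWords doc).Nodup := by
      unfold pvCleanWords; exact PySem.Set.nodup_ofList _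
    rw [ih, pv_inner_getD (pvCleanWords doc) hnd]
    by_cases hmem : w ∈ pvCleanWords doc
    · simp [hmem, List.append_assoc]
    · simp [hmem]

-- A's inner loop over doc_list computes exactly the index's list for that keyword
theorem pv_A_inner_clean (docs : List String) (word : String) (i : Int) (acc : List Int) :
    (docs.foldl
      (fun (st : Int × List Int) sentence =>
        (st.1 + 1, if (pvCleanWords sentence).contains word then st.2 ++ [st.1] else st.2))
      (i, acc)).2
    = acc ++ (((PySem.List.enumerate docs i).filter
        (fun p => (pvCleanWords p.2).contains word)).map (·.1)) := by
  induction docs generalizing i acc with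
  | nil => simp [PySem.List.enumerate_nil]
  | cons doc t ih =>
    rw [PySem.List.enumerate_cons, List.foldl_cons, List.filter_cons]
    by_cases hc : (pvCleanWords doc).contains word
    · rw [if_pos hc, if_pos hc, ih, List.map_cons]
      simp only [List.append_assoc, List.singleton_append]
    · rw [if_neg hc, if_neg hc, ih]

theorem pv_A_inner (docs : List String) (word : String) (i : Int) (acc : List Int) :
    (docs.foldl
      (fun (st : Int × List Int) sentence =>
        let sentence := PySem.Str.lower sentence
        let sentence := [".", ",", "!"].foldl (fun s v => PySem.Str.replace s v "") sentence
        let doc_number :=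
          if (PySem.Str.split₀ sentence).contains word then st.2 ++ [st.1] else st.2
        (st.1 + 1, doc_number))
      (i, acc)).2
    = acc ++ (((PySem.List.enumerate docs i).filter
        (fun p => (pvCleanWords p.2).contains word)).map (·.1)) := by
  have hcongr := PySem.List.foldl_congr_mem
      (l := docs) (init := ((i : Int), acc))
      (f := fun (st : Int × List Int) sentence =>
        let sentence := PySem.Str.lower sentence
        let sentence := [".", ",", "!"].foldl (fun s v => PySem.Str.replace s v "") sentence
        let doc_number :=
          if (PySem.Str.split₀ sentence).contains word then st.2 ++ [st.1] else st.2
        (st.1 + 1, doc_number))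
      (g := fun (st : Int × List Int) sentence =>
        (st.1 + 1, if (pvCleanWords sentence).contains word then st.2 ++ [st.1] else st.2))
      (fun st sentence _ => by
        show (st.1 + 1, if (PySem.Str.split₀ (PySem.Str.replace (PySem.Str.replace
            (PySem.Str.replace (PySem.Str.lower sentence) "." "") "," "") "!" "")).contains word
            then st.2 ++ [st.1] else st.2)
            = (st.1 + 1, if (pvCleanWords sentence).contains word then st.2 ++ [st.1] else st.2)
        rw [show pvCleanWords sentence = PySem.Set.ofList (PySem.Str.split₀ (PySem.Str.replace
            (PySem.Str.replace (PySem.Str.replace (PySem.Str.lower sentence) "." "") "," "") "!" ""))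
          from rfl, pv_contains_ofList])
  rw [hcongr]
  exact pv_A_inner_clean docs word i acc

-- ===== VERDICT (by name: the statement is the Claim_ definition above) =====
theorem multi_word_search_spec : Claim_equal_multi_word_search := by
  intro doc_list keywords _
  unfold Spec_multi_word_search multi_word_search multi_word_search_alt pvBuildIndex
  simp only []
  refine congrArg PySem.Dict.items ?_
  apply PySem.List.foldl_congr_mem
  intro dic word _
  congr 1
  rw [pv_A_inner doc_list word 0 [], pv_index_getD]
  simp
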